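-- pv_equiv track=rewrite | github.com/Antoo22D/Exercisce_Python_UNIVERSITY | E3_2.py | sottos
-- ===== SOURCE A (Python) =====
-- def sottos(miaseq1,sottoseq):
--     sotss=[]
--     for i in range(len(miaseq1)):
--         if i ==len(miaseq1)-1:
--             sotss.append(miaseq1[i])
--             if len(sotss)>=2:
--                 sottoseq+=1
--         else:
--             if int(miaseq1[i])+1==int(miaseq1[i+1]):
--                 sotss.append(miaseq1[i])
--             else:
--                 sotss.append(miaseq1[i])
--                 if len(sotss)>=2:
--                     sottoseq+=1
--                 sotss=[]
--     return sottoseq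
-- ===== SOURCE B (Python) =====
-- def sottos(miaseq1, sottoseq):
--     # pass 1: adjacency table of consecutive +1 steps
--     b = [int(miaseq1[i]) + 1 == int(miaseq1[i + 1]) for i in range(len(miaseq1) - 1)]
--     # pass 2: count maximal True blocks (each = one increasing run of length >= 2)
--     blocks = sum(1 for prev, v in zip([False] + b, b) if v and not prev)
--     return sottoseq + blocks
-- ===== Notes on version B (the rewrite author's own statement) =====
-- stated objective: simpler
-- what changed: Replaced A's single stateful loop that accumulates a run list and closes runs at breaks/end with two plain passes: build the boolean adjacency table of consecutive +1 steps, then count maximal True blocks via a shifted zip.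
import Mathlib
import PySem

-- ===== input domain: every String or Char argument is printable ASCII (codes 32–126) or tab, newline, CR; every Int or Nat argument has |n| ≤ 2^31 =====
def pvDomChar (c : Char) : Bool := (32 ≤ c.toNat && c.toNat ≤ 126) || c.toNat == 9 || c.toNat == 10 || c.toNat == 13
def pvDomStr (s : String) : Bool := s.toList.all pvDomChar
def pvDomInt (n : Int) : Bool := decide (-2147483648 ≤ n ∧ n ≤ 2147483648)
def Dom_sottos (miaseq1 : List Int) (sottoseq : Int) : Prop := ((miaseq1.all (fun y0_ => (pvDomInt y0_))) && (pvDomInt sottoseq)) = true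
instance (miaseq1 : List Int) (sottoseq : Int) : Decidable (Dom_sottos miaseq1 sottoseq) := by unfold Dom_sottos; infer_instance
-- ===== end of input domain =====

-- B replaces A's single stateful run-accumulating loop with two passes (adjacency table, then
-- maximal-True-block count); objective: simpler. Both are total on List Int.

-- ===== PORT A =====
def sottos (miaseq1 : List Int) (sottoseq : Int) : Int :=
  let r := (PySem.List.pyRange 0 (PySem.List.len miaseq1) 1).foldl
    (fun (st : List Int × Int) i =>
      if i = PySem.List.len miaseq1 - 1 then
        let sotss := st.1 ++ [PySem.List.pyGetD miaseq1 i 0]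
        (sotss, if 2 ≤ sotss.length then st.2 + 1 else st.2)
      else
        if PySem.List.pyGetD miaseq1 i 0 + 1 = PySem.List.pyGetD miaseq1 (i + 1) 0 then
          (st.1 ++ [PySem.List.pyGetD miaseq1 i 0], st.2)
        else
          let sotss := st.1 ++ [PySem.List.pyGetD miaseq1 i 0]
          (([] : List Int), if 2 ≤ sotss.length then st.2 + 1 else st.2))
    (([] : List Int), sottoseq)
  r.2

-- ===== PORT B =====
def sottos_alt (miaseq1 : List Int) (sottoseq : Int) : Int :=
  let b := (PySem.List.pyRange 0 (PySem.List.len miaseq1 - 1) 1).map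
    (fun i => PySem.List.pyGetD miaseq1 i 0 + 1 == PySem.List.pyGetD miaseq1 (i + 1) 0)
  let blocks := ((false :: b).zip b).foldl
    (fun acc pv => if pv.2 && !pv.1 then acc + 1 else acc) (0 : Int)
  sottoseq + blocks

-- ===== PRECONDITION & SPEC =====
def Spec_sottos (miaseq1 : List Int) (sottoseq : Int) (out : Int) : Prop := out = sottos_alt miaseq1 sottoseq
instance (miaseq1 : List Int) (sottoseq : Int) (out : Int) : Decidable (Spec_sottos miaseq1 sottoseq out) := by unfold Spec_sottos; infer_instance

-- ===== CLAIM (what is proved, stated in full; the proofs are below) =====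
def Claim_equal_sottos : Prop := ∀ (miaseq1 : List Int) (sottoseq : Int), Dom_sottos miaseq1 sottoseq → Spec_sottos miaseq1 sottoseq (sottos miaseq1 sottoseq)

-- ===== LEMMAS AND PROOFS =====

-- A's loop body, named for the proofs (identical to the inline body of `sottos`).
def bodyA (xs : List Int) (st : List Int × Int) (i : Int) : List Int × Int :=
  if i = PySem.List.len xs - 1 then
    let sotss := st.1 ++ [PySem.List.pyGetD xs i 0]
    (sotss, if 2 ≤ sotss.length then st.2 + 1 else st.2)
  else
    if PySem.List.pyGetD xs i 0 + 1 = PySem.List.pyGetD xs (i + 1) 0 then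
      (st.1 ++ [PySem.List.pyGetD xs i 0], st.2)
    else
      let sotss := st.1 ++ [PySem.List.pyGetD xs i 0]
      (([] : List Int), if 2 ≤ sotss.length then st.2 + 1 else st.2)

-- Adjacency table of consecutive +1 steps.
def adjB : List Int → List Bool
  | [] => []
  | [_] => []
  | x :: y :: t => (x + 1 == y) :: adjB (y :: t)

-- Number of maximal True blocks, given the value preceding the list.
def cntC : List Bool → Bool → Int
  | [], _ => 0
  | v :: t, prev => (if v && !prev then 1 else 0) + cntC t v

-- Abstract form of A's loop over the adjacency list (k = current run-list length).
def runA : List Bool → Nat → Int → Int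
  | [], k, s => if 1 ≤ k then s + 1 else s
  | true :: t, k, s => runA t (k + 1) s
  | false :: t, k, s => runA t 0 (if 1 ≤ k then s + 1 else s)

theorem sottos_eq_fold (xs : List Int) (s : Int) :
    sottos xs s = ((PySem.List.pyRange 0 (PySem.List.len xs) 1).foldl (bodyA xs) ([], s)).2 := rfl

theorem pyGetD_cons_succ (x : Int) (ys : List Int) (k : Nat) :
    PySem.List.pyGetD (x :: ys) ((k : Int) + 1) 0 = PySem.List.pyGetD ys (k : Int) 0 := by
  have e : ((k : Int) + 1) = ((k + 1 : Nat) : Int) := by push_cast; ring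
  rw [e, PySem.List.pyGetD_natCast, PySem.List.pyGetD_natCast]
  simp [List.getD]

theorem pyGetD_cons_succ2 (x : Int) (ys : List Int) (k : Nat) :
    PySem.List.pyGetD (x :: ys) ((k : Int) + 1 + 1) 0 = PySem.List.pyGetD ys ((k : Int) + 1) 0 := by
  have e : (k : Int) + 1 + 1 = (((k + 1 : Nat) : Int)) + 1 := by push_cast; ring
  have e2 : (k : Int) + 1 = ((k + 1 : Nat) : Int) := by push_cast; ring
  rw [e, e2, pyGetD_cons_succ]

theorem pyGetD_one_cons2 (x y : Int) (t : List Int) :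
    PySem.List.pyGetD (x :: y :: t) (0 + 1) 0 = y := by
  have e : (0 : Int) + 1 = ((1 : Nat) : Int) := by norm_num
  rw [e, PySem.List.pyGetD_natCast]
  rfl

theorem bodyA_shift (x : Int) (ys : List Int) (st : List Int × Int) (k : Nat) :
    bodyA (x :: ys) st ((k : Int) + 1) = bodyA ys st (k : Int) := by
  simp only [bodyA, PySem.List.len_eq]
  rw [pyGetD_cons_succ, pyGetD_cons_succ2]
  have hcond : ((k : Int) + 1 = ((x :: ys).length : Int) - 1) = ((k : Int) = (ys.length : Int) - 1) := by
    apply propext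
    constructor <;> intro h <;> (simp only [List.length_cons] at h ⊢) <;> push_cast at h ⊢ <;> omega
  simp only [hcond]

theorem pyRange_len (n : Nat) :
    PySem.List.pyRange 0 (n : Int) 1 = (List.range n).map (fun (k : Nat) => (k : Int)) := by
  rw [PySem.List.pyRange_one]
  simp only [sub_zero, Int.toNat_natCast, zero_add]

theorem foldl_congr' {α β : Type} (l : List β) (f g : α → β → α) (init : α)
    (h : ∀ (a : α) (x : β), x ∈ l → f a x = g a x) : l.foldl f init = l.foldl g init := by
  induction l generalizing init with
  | nil => rfl
  | cons x t ih =>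
    rw [List.foldl_cons, List.foldl_cons, h init x (by simp)]
    exact ih _ (fun a z hz => h a z (by simp [hz]))

theorem foldA (x : Int) (t : List Int) :
    ∀ (sotss : List Int) (s : Int),
      (((List.range (x :: t).length).map (fun (k : Nat) => (k : Int))).foldl (bodyA (x :: t)) (sotss, s)).2
        = runA (adjB (x :: t)) sotss.length s := by
  induction t generalizing x with
  | nil =>
    intro sotss s
    have h1 : ((x :: ([] : List Int)).length) = 1 := rfl
    rw [h1, List.range_one, List.map_cons, List.map_nil, List.foldl_cons, List.foldl_nil]
    simp only [Nat.cast_zero, bodyA, PySem.List.len_eq]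
    rw [if_pos (by simp), PySem.List.pyGetD_zero_cons]
    simp only [adjB, runA, List.length_append, List.length_cons, List.length_nil]
    by_cases h : 1 ≤ sotss.length
    · rw [if_pos (by omega), if_pos h]
    · rw [if_neg (by omega), if_neg h]
  | cons y t ih =>
    intro sotss s
    have hlen : (x :: y :: t).length = (y :: t).length + 1 := rfl
    rw [hlen, List.range_succ_eq_map, List.map_cons, List.foldl_cons, List.map_map]
    simp only [Nat.cast_zero]
    have hfun : ((List.range (y :: t).length).map ((fun (k : Nat) => (k : Int)) ∘ Nat.succ)).foldl
          (bodyA (x :: y :: t)) (bodyA (x :: y :: t) (sotss, s) 0)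
        = ((List.range (y :: t).length).map (fun (k : Nat) => (k : Int))).foldl
          (bodyA (y :: t)) (bodyA (x :: y :: t) (sotss, s) 0) := by
      rw [List.foldl_map, List.foldl_map]
      apply foldl_congr'
      intro st k _
      have e : ((Nat.succ k : Nat) : Int) = (k : Int) + 1 := by push_cast; ring
      show bodyA (x :: y :: t) st ((Nat.succ k : Nat) : Int) = bodyA (y :: t) st (k : Int)
      rw [e, bodyA_shift]
    rw [hfun]
    have hstep : bodyA (x :: y :: t) (sotss, s) 0 =
        if x + 1 = y then (sotss ++ [x], s)
        else (([] : List Int), if 1 ≤ sotss.length then s + 1 else s) := by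
      simp only [bodyA, PySem.List.len_eq]
      rw [if_neg (by simp only [List.length_cons]; push_cast; omega)]
      rw [PySem.List.pyGetD_zero_cons, pyGetD_one_cons2]
      by_cases hc : x + 1 = y
      · rw [if_pos hc, if_pos hc]
      · rw [if_neg hc, if_neg hc]
        simp only [List.length_append, List.length_cons, List.length_nil]
        by_cases h : 1 ≤ sotss.length
        · rw [if_pos (by omega), if_pos h]
        · rw [if_neg (by omega), if_neg h]
    rw [hstep]
    have hadj : adjB (x :: y :: t) = (x + 1 == y) :: adjB (y :: t) := rfl
    by_cases hc : x + 1 = y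
    · rw [if_pos hc, ih y (sotss ++ [x]) s, hadj]
      have hb : (x + 1 == y) = true := by simpa using hc
      rw [hb]
      simp [runA]
    · rw [if_neg hc, ih y [] _, hadj]
      have hb : (x + 1 == y) = false := by simpa using hc
      rw [hb]
      simp [runA]

theorem runA_eq_cntC (bs : List Bool) :
    ∀ (k : Nat) (s : Int),
      runA bs k s = s + cntC bs (decide (1 ≤ k)) + (if 1 ≤ k then 1 else 0) := by
  induction bs with
  | nil => intro k s; by_cases h : 1 ≤ k <;> simp [runA, cntC, h]
  | cons v t ih =>
    intro k s
    cases v with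
    | true =>
      rw [show runA (true :: t) k s = runA t (k + 1) s from rfl, ih]
      simp only [cntC]
      by_cases h : 1 ≤ k
      · simp [h]; try ring
      · simp [h]; try ring
    | false =>
      rw [show runA (false :: t) k s = runA t 0 (if 1 ≤ k then s + 1 else s) from rfl, ih]
      simp only [cntC]
      by_cases h : 1 ≤ k
      · simp [h]; ring
      · simp [h]

theorem zip_fold_cnt (bs : List Bool) :
    ∀ (prev : Bool) (acc : Int),
      ((prev :: bs).zip bs).foldl (fun acc pv => if pv.2 && !pv.1 then acc + 1 else acc) acc
        = acc + cntC bs prev := by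
  induction bs with
  | nil => intro prev acc; simp [cntC]
  | cons v t ih =>
    intro prev acc
    rw [show (prev :: v :: t).zip (v :: t) = (prev, v) :: (v :: t).zip t from rfl,
        List.foldl_cons, ih v]
    simp only [cntC]
    by_cases h : v && !prev
    · simp [h]; ring
    · simp [h]

theorem adj_map_eq (xs : List Int) :
    (PySem.List.pyRange 0 (PySem.List.len xs - 1) 1).map
        (fun i => PySem.List.pyGetD xs i 0 + 1 == PySem.List.pyGetD xs (i + 1) 0)
      = adjB xs := by
  induction xs with
  | nil => simp [adjB, PySem.List.pyRange_one_eq_nil]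
  | cons x t ih =>
    cases t with
    | nil => simp [adjB, PySem.List.pyRange_one_eq_nil]
    | cons y t' =>
      have hlen : PySem.List.len (x :: y :: t') - 1 = (((y :: t').length : Nat) : Int) := by
        simp only [PySem.List.len_eq, List.length_cons]; push_cast; ring
      rw [hlen, pyRange_len]
      have hlen2 : PySem.List.len (y :: t') - 1 = ((t'.length : Nat) : Int) := by
        simp only [PySem.List.len_eq, List.length_cons]; push_cast; ring
      rw [hlen2, pyRange_len] at ih
      simp only [List.length_cons, List.range_succ_eq_map, List.map_cons, List.map_map,
        Nat.cast_zero] at ih ⊢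
      have hadj : adjB (x :: y :: t') = (x + 1 == y) :: adjB (y :: t') := rfl
      rw [hadj, ← ih]
      congr 1
      · rw [PySem.List.pyGetD_zero_cons, pyGetD_one_cons2]
      · apply List.map_congr_left
        intro k _
        show (PySem.List.pyGetD (x :: y :: t') ((Nat.succ k : Nat) : Int) 0 + 1
            == PySem.List.pyGetD (x :: y :: t') (((Nat.succ k : Nat) : Int) + 1) 0)
          = (PySem.List.pyGetD (y :: t') ((k : Nat) : Int) 0 + 1
            == PySem.List.pyGetD (y :: t') (((k : Nat) : Int) + 1) 0)
        have e : ((Nat.succ k : Nat) : Int) = (k : Int) + 1 := by push_cast; ring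
        rw [e, pyGetD_cons_succ, pyGetD_cons_succ2]

theorem sottos_alt_eq (xs : List Int) (s : Int) :
    sottos_alt xs s = s + cntC (adjB xs) false := by
  unfold sottos_alt
  simp only [adj_map_eq, zip_fold_cnt, zero_add]

theorem sottos_eq (xs : List Int) (s : Int) :
    sottos xs s = s + cntC (adjB xs) false := by
  cases xs with
  | nil =>
    simp [sottos, adjB, cntC, PySem.List.pyRange_one_eq_nil]
  | cons x t =>
    rw [sottos_eq_fold]
    have hl : PySem.List.len (x :: t) = (((x :: t).length : Nat) : Int) := by simp
    rw [hl, pyRange_len, foldA]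
    rw [runA_eq_cntC]
    simp

-- ===== VERDICT (by name: the statement is the Claim_ definition above) =====
theorem sottos_spec : Claim_equal_sottos := by
  intro xs s _
  unfold Spec_sottos
  rw [sottos_eq, sottos_alt_eq]
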